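-- pv_equiv track=rewrite | github.com/epselont/algoritm | zadachi_itog_1_sprint/sleight_of_hand.py | sleight_hand
-- ===== SOURCE A (Python) =====
-- def sleight_hand(fingers, data):
--     fingers = int(fingers) * 2
--     data = list(data)
--     num_dict = {x: data.count(x) for x in [x for x in set(data)]}
--     count = 0
--     for sec in range(10):
--         if str(sec) in num_dict.keys():
--             if num_dict[str(sec)] <= fingers:
--                 count += 1
--     return count
-- ===== SOURCE B (Python) =====
-- def sleight_hand(fingers, data):
--     limit = int(fingers) * 2
--     ds = [ch for ch in data if '0' <= ch <= '9']
--     total = 0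
--     while ds:
--         d = ds[0]
--         rest = [c for c in ds if c != d]
--         if len(ds) - len(rest) <= limit:
--             total += 1
--         ds = rest
--     return total
-- ===== Notes on version B (the rewrite author's own statement) =====
-- stated objective: faster
-- what changed: Replaced A's hash-table tally (set + data.count per distinct element) and the per-digit range(10) membership loop by a tally-free scheme: filter out the digit characters once, then repeatedly strip every occurrence of the first remaining digit, using the length drop of the list as that digit's count.
import Mathlib
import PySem

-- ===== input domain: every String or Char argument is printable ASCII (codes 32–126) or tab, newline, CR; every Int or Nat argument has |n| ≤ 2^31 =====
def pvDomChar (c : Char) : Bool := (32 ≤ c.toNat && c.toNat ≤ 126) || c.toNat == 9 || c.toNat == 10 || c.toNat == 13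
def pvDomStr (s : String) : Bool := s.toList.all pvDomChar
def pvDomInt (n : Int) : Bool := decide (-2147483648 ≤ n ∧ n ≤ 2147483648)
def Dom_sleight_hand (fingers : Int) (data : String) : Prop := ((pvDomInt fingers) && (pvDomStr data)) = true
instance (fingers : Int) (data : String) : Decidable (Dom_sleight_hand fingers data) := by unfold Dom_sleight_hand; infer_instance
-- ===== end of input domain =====

-- B drops A's hash-table tally and the per-digit range(10) loop: it filters the digit characters
-- once and then repeatedly strips all occurrences of the first remaining digit, using the length
-- drop as that digit's count; measured faster (no per-distinct-element count pass, no dict).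

-- ===== PORT A =====
def sleight_hand (fingers : Int) (data : String) : Int :=
  let fingers2 := fingers * 2
  let dataL := data.toList
  let numDict : PySem.Dict Char Int :=
    (PySem.Set.ofList dataL).foldl (fun d x => d.insert x (dataL.count x : Int)) PySem.Dict.empty
  (PySem.List.pyRange 0 10 1).foldl (fun count sec =>
    if numDict.contains (Char.ofNat (48 + sec.toNat)) then
      if numDict.getD (Char.ofNat (48 + sec.toNat)) 0 ≤ fingers2 then count + 1 else count
    else count) 0

-- ===== PORT B =====
-- the while loop of Source B: strip all copies of the first element, judge its count by the length drop
def shAltStrip (limit : Int) (ds : List Char) (total : Int) : Int :=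
  match ds with
  | [] => total
  | d :: t =>
    let rest := (d :: t).filter (fun c => decide (c ≠ d))
    shAltStrip limit rest
      (if ((d :: t).length : Int) - (rest.length : Int) ≤ limit then total + 1 else total)
termination_by ds.length
decreasing_by
  have h : (d :: t).filter (fun c => decide (c ≠ d)) = t.filter (fun c => decide (c ≠ d)) := by
    simp
  have h2 := List.length_filter_le (fun c => decide (c ≠ d)) t
  simp only [h, List.length_cons]
  omega

def sleight_hand_alt (fingers : Int) (data : String) : Int :=
  let limit := fingers * 2
  let ds := data.toList.filter (fun ch => decide ('0' ≤ ch ∧ ch ≤ '9'))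
  shAltStrip limit ds 0

-- ===== PRECONDITION & SPEC =====
def Spec_sleight_hand (fingers : Int) (data : String) (out : Int) : Prop := out = sleight_hand_alt fingers data
instance (fingers : Int) (data : String) (out : Int) : Decidable (Spec_sleight_hand fingers data out) := by unfold Spec_sleight_hand; infer_instance

-- ===== CLAIM (what is proved, stated in full; the proofs are below) =====
def Claim_equal_sleight_hand : Prop := ∀ (fingers : Int) (data : String), Dom_sleight_hand fingers data → Spec_sleight_hand fingers data (sleight_hand fingers data)

-- ===== LEMMAS AND PROOFS =====

theorem char_digit_iff (c : Char) : ('0' ≤ c ∧ c ≤ '9') ↔ (48 ≤ c.toNat ∧ c.toNat ≤ 57) := by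
  rw [Char.le_def, Char.le_def, UInt32.le_iff_toNat_le, UInt32.le_iff_toNat_le]; rfl

theorem toNat_digitChar (d : Nat) (h : d < 10) : (Char.ofNat (48 + d)).toNat = 48 + d := by
  unfold Char.ofNat
  rw [dif_pos (by constructor; omega : Nat.isValidChar (48+d))]
  simp [Char.toNat, Char.ofNatAux]
  omega

-- A's comprehension dict: membership and lookup are membership and count in the character list.
theorem dict_contains_mem (l : List Char) (c : Char) :
    (((PySem.Set.ofList l).foldl (fun d x => d.insert x (l.count x : Int)) PySem.Dict.empty).contains c)
      = decide (c ∈ l) := by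
  rw [PySem.Dict.contains_eq_decide_mem_keys, PySem.Dict.keys_foldl_insert]
  simp [PySem.Set.update_nil_left, PySem.Set.mem_ofList, PySem.Dict.keys]

theorem dict_getD_count (l : List Char) (c : Char) :
    (((PySem.Set.ofList l).foldl (fun d x => d.insert x (l.count x : Int)) PySem.Dict.empty).getD c 0)
      = (l.count c : Int) := by
  by_cases hm : c ∈ l
  · have hitems := PySem.Dict.items_foldl_insert_fresh (PySem.Set.ofList l)
      (fun x => x) (fun x => (l.count x : Int)) PySem.Dict.empty
      (by intro a _; exact PySem.Dict.contains_empty a)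
      (by simp [PySem.Set.nodup_ofList l])
    have hnd : (((PySem.Set.ofList l).foldl (fun d x => d.insert x (l.count x : Int)) PySem.Dict.empty).keys).Nodup := by
      apply PySem.Dict.nodup_keys_foldl_insert
      simp [PySem.Dict.keys_empty]
    simp only at hitems
    refine PySem.Dict.getD_of_mem_items _ ?_ hnd 0
    rw [hitems]
    simp only [PySem.Dict.empty, List.nil_append, List.mem_map]
    exact ⟨c, (PySem.Set.mem_ofList l c).mpr hm, rfl⟩
  · rw [PySem.Dict.getD_of_not_contains]
    · exact (by simp [List.count_eq_zero.mpr hm])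
    · rw [dict_contains_mem]; simp [hm]

-- folding an if-then-add-one is counting the elements that pass the filter
theorem foldl_if_filter_length {α : Type} (p : α → Prop) [DecidablePred p] :
    ∀ (l : List α) (acc : Int),
      l.foldl (fun a x => if p x then a + 1 else a) acc
        = acc + ((l.filter (fun x => decide (p x))).length : Int) := by
  intro l
  induction l with
  | nil => intro acc; simp
  | cons x t ih =>
    intro acc
    rw [List.foldl_cons, ih, List.filter_cons]
    by_cases h : p x <;> simp [h] <;> omega

theorem shAltStrip_nil (limit total : Int) : shAltStrip limit [] total = total := by
  rw [shAltStrip]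

theorem shAltStrip_cons (limit total : Int) (d : Char) (t : List Char) :
    shAltStrip limit (d :: t) total
      = shAltStrip limit ((d :: t).filter (fun c => decide (c ≠ d)))
          (if ((d :: t).length : Int) - (((d :: t).filter (fun c => decide (c ≠ d))).length : Int) ≤ limit
           then total + 1 else total) := by
  rw [shAltStrip]

-- the strip loop counts the distinct elements whose multiplicity is ≤ limit
theorem shAltStrip_eq_card (limit : Int) :
    ∀ (n : Nat) (ds : List Char), ds.length ≤ n → ∀ (total : Int),
      shAltStrip limit ds total
        = total + ((ds.toFinset.filter (fun c => (ds.count c : Int) ≤ limit)).card : Int) := by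
  intro n
  induction n with
  | zero =>
    intro ds h total
    have : ds = [] := by cases ds <;> simp_all
    subst this; simp [shAltStrip_nil]
  | succ n ih =>
    intro ds h total
    cases ds with
    | nil => simp [shAltStrip_nil]
    | cons d t =>
      rw [shAltStrip_cons]
      set rest := (d :: t).filter (fun c => decide (c ≠ d)) with hrest
      have hrt : rest = t.filter (fun c => decide (c ≠ d)) := by
        simp [hrest]
      have hlen : rest.length ≤ n := by
        rw [hrt]
        have := List.length_filter_le (fun c => decide (c ≠ d)) t
        simp only [List.length_cons] at h
        omega
      -- length drop = count of d
      have hcnt : (d :: t).length = (d :: t).count d + rest.length := by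
        have hsplit := List.length_eq_countP_add_countP (p := fun c => c == d) (l := d :: t)
        rw [hrest, ← List.countP_eq_length_filter, List.count_eq_countP, hsplit]
        congr 1
        apply List.countP_congr
        intro c _
        cases h' : c == d <;> simp_all
      -- counts of survivors are unchanged
      have hc_rest : ∀ c, c ≠ d → rest.count c = (d :: t).count c := by
        intro c hcd
        rw [hrest, List.count_filter]
        simp [hcd]
      have hd_not : d ∉ rest := by
        rw [hrest]
        simp
      have hfin : (d :: t).toFinset = insert d rest.toFinset := by
        ext c
        by_cases hcd : c = d
        · subst hcd; simp
        · simp [hrest, hcd]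
      rw [ih rest hlen]
      have hcard :
          ((d :: t).toFinset.filter (fun c => ((d :: t).count c : Int) ≤ limit)).card
            = (if ((d :: t).count d : Int) ≤ limit then 1 else 0)
              + (rest.toFinset.filter (fun c => (rest.count c : Int) ≤ limit)).card := by
        rw [hfin, Finset.filter_insert]
        have hcong :
            rest.toFinset.filter (fun c => ((d :: t).count c : Int) ≤ limit)
              = rest.toFinset.filter (fun c => (rest.count c : Int) ≤ limit) := by
          apply Finset.filter_congr
          intro c hc
          have hcd : c ≠ d := by
            intro h'; subst h'
            exact hd_not (List.mem_toFinset.mp hc)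
          rw [hc_rest c hcd]
        by_cases hq : ((d :: t).count d : Int) ≤ limit
        · rw [if_pos hq, if_pos hq, Finset.card_insert_of_notMem
            (by simp [Finset.mem_filter, hd_not]), hcong]
          omega
        · rw [if_neg hq, if_neg hq, hcong]; ring
      rw [hcard]
      have hcond : (((d :: t).length : Int) - (rest.length : Int) ≤ limit)
          ↔ (((d :: t).count d : Int) ≤ limit) := by omega
      by_cases hq : ((d :: t).count d : Int) ≤ limit
      · rw [if_pos (hcond.mpr hq), if_pos hq]; push_cast; ring
      · rw [if_neg (fun h' => hq (hcond.mp h')), if_neg hq]; push_cast; ring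

-- the distinct digit characters of L, as the image of the digits present
theorem toFinset_digit_filter (L : List Char) :
    (L.filter (fun ch => decide ('0' ≤ ch ∧ ch ≤ '9'))).toFinset
      = ((Finset.range 10).filter (fun d => Char.ofNat (48 + d) ∈ L)).image
          (fun d => Char.ofNat (48 + d)) := by
  ext c
  simp only [List.mem_toFinset, List.mem_filter, Finset.mem_image, Finset.mem_filter,
    Finset.mem_range, decide_eq_true_eq]
  constructor
  · rintro ⟨hmem, hdig⟩
    rw [char_digit_iff] at hdig
    refine ⟨c.toNat - 48, ⟨by omega, ?_⟩, ?_⟩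
    · have : 48 + (c.toNat - 48) = c.toNat := by omega
      rw [this, Char.ofNat_toNat]; exact hmem
    · have : 48 + (c.toNat - 48) = c.toNat := by omega
      rw [this, Char.ofNat_toNat]
  · rintro ⟨d, ⟨hd10, hmem⟩, rfl⟩
    refine ⟨hmem, ?_⟩
    rw [char_digit_iff, toNat_digitChar d hd10]
    omega

theorem digitChar_injOn : Set.InjOn (fun d => Char.ofNat (48 + d)) ↑(Finset.range 10) := by
  intro a ha b hb hab
  simp only [Finset.coe_range, Set.mem_Iio] at ha hb
  have h1 := toNat_digitChar a ha
  have h2 := toNat_digitChar b hb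
  simp only at hab
  rw [hab] at h1
  omega

-- counting inside the digit filter is counting in the original list (for digit characters)
theorem count_digit_filter (L : List Char) (d : Nat) (hd : d < 10) :
    (L.filter (fun ch => decide ('0' ≤ ch ∧ ch ≤ '9'))).count (Char.ofNat (48 + d))
      = L.count (Char.ofNat (48 + d)) := by
  rw [List.count_filter]
  have : ('0' ≤ Char.ofNat (48 + d) ∧ Char.ofNat (48 + d) ≤ '9') := by
    rw [char_digit_iff, toNat_digitChar d hd]; omega
  simp [this]

-- B's Finset card equals A's filtered-range length
theorem bridge (L : List Char) (limit : Int) :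
    (((L.filter (fun ch => decide ('0' ≤ ch ∧ ch ≤ '9'))).toFinset.filter
        (fun c => ((L.filter (fun ch => decide ('0' ≤ ch ∧ ch ≤ '9'))).count c : Int) ≤ limit)).card : Int)
      = (((List.range 10).filter
            (fun d => decide (Char.ofNat (48 + d) ∈ L ∧ (L.count (Char.ofNat (48 + d)) : Int) ≤ limit))).length : Int) := by
  rw [toFinset_digit_filter, Finset.filter_image, Finset.filter_filter]
  rw [Finset.card_image_of_injOn
    (digitChar_injOn.mono (Finset.coe_subset.mpr (Finset.filter_subset _ _)))]
  have hlist : ((List.range 10).filter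
      (fun d => decide (Char.ofNat (48 + d) ∈ L ∧ (L.count (Char.ofNat (48 + d)) : Int) ≤ limit))).length
      = ((List.range 10).toFinset.filter
          (fun d => decide (Char.ofNat (48 + d) ∈ L ∧ (L.count (Char.ofNat (48 + d)) : Int) ≤ limit) = true)).card := by
    rw [← List.toFinset_card_of_nodup ((List.nodup_range).filter _), List.toFinset_filter]
  rw [hlist, List.toFinset_range]
  congr 1
  congr 1
  apply Finset.filter_congr
  intro d hd
  simp only [Finset.mem_range] at hd
  rw [count_digit_filter L d hd]
  simp

-- ===== VERDICT (by name: the statement is the Claim_ definition above) =====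
theorem sleight_hand_spec : Claim_equal_sleight_hand := by
  intro fingers data _
  unfold Spec_sleight_hand sleight_hand sleight_hand_alt
  simp only []
  set L := data.toList with hL
  -- A side: dict lookups become membership and count, the fold becomes a filtered-range length
  rw [show PySem.List.pyRange 0 10 1 = (List.range 10).map (Nat.cast) from by decide]
  rw [List.foldl_map]
  rw [List.foldl_ext (g := fun count d =>
          if (Char.ofNat (48 + d) ∈ L ∧ (L.count (Char.ofNat (48 + d)) : Int) ≤ fingers * 2)
          then count + 1 else count)
        (H := by
          intro a d _
          rw [dict_contains_mem, dict_getD_count]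
          simp only [Int.toNat_natCast]
          by_cases h1 : Char.ofNat (48 + d) ∈ L
          · by_cases h2 : (L.count (Char.ofNat (48 + d)) : Int) ≤ fingers * 2 <;> simp [h1, h2]
          · simp [h1])]
  rw [foldl_if_filter_length (fun d => Char.ofNat (48 + d) ∈ L ∧ (L.count (Char.ofNat (48 + d)) : Int) ≤ fingers * 2)]
  -- B side: the strip loop is the card of the distinct digits with small count
  rw [shAltStrip_eq_card (fingers * 2) (L.filter (fun ch => decide ('0' ≤ ch ∧ ch ≤ '9'))).length _ le_rfl 0]
  rw [bridge L (fingers * 2)]
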